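-- pv_equiv track=rewrite | github.com/Bishal-cs/Python-learning-codes | Python lab assigment/Sum of numbers in list.py | sum_of_digits_in_list
-- ===== SOURCE A (Python) =====
-- def sum_of_digits_in_list(num_list):
--     # List to store the sum of digits for each number
--     sum_digits_list = []
--
--     # Loop through each number in the list
--     for num in num_list:
--         sum_digits = 0
--         original_num = num
--
--         # Extract each digit manually using mathematical operations
--         while num > 0:
--             digit = num % 10
--             sum_digits += digit
--             num = num // 10
--
--         sum_digits_list.append(sum_digits)
--
--     return sum_digits_list
-- ===== SOURCE B (Python) =====
-- def sum_of_digits_in_list(num_list):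
--     # Digit sum via decimal string; non-positive numbers yield 0 (as the
--     # original's `while num > 0` loop never runs for them).
--     return [sum(int(c) for c in str(num)) if num > 0 else 0 for num in num_list]
-- ===== Notes on version B (the rewrite author's own statement) =====
-- stated objective: idiomatic
-- what changed: Replaces the explicit accumulator loop with divmod digit extraction by a single comprehension that sums the integer values of the characters of str(num), guarding num > 0 to keep A's 0 for non-positive numbers.
import Mathlib
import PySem

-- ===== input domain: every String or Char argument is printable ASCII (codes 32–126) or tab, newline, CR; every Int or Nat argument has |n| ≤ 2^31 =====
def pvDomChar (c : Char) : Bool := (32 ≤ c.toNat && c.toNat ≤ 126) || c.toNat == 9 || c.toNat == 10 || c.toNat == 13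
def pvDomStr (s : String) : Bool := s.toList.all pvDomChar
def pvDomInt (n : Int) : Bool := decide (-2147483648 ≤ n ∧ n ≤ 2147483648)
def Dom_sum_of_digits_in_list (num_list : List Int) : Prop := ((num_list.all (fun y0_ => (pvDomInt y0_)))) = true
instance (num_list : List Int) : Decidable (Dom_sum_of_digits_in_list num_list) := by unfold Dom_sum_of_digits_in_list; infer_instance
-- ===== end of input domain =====

-- B replaces the divmod accumulator loop by summing the integer values of str(num)'s characters (idiomatic; equal cost).
-- ===== PORT A =====
-- inner while loop of A: sum_digits accumulates num % 10 while num > 0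
def pvDigitLoop (num s : Int) : Int :=
  if _h : num > 0 then
    pvDigitLoop (PySem.Int.floordiv num 10) (s + PySem.Int.mod num 10)
  else s
termination_by num.toNat
decreasing_by
  simp only [PySem.Int.floordiv, Int.fdiv_eq_ediv]
  omega

def sum_of_digits_in_list (num_list : List Int) : List Int :=
  num_list.foldl (fun sum_digits_list num => sum_digits_list ++ [pvDigitLoop num 0]) []

-- ===== PORT B =====
-- int(c) for a single character c (never a ValueError here: str(num) of a positive num is all digits)
def pvCharVal (c : Char) : Int := (PySem.Int.ofChars? [c]).getD 0

def sum_of_digits_in_list_alt (num_list : List Int) : List Int :=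
  num_list.map (fun num =>
    if num > 0 then ((PySem.Int.toChars num).map pvCharVal).sum else 0)

-- ===== PRECONDITION & SPEC =====
def Spec_sum_of_digits_in_list (num_list : List Int) (out : List Int) : Prop := out = sum_of_digits_in_list_alt num_list
instance (num_list : List Int) (out : List Int) : Decidable (Spec_sum_of_digits_in_list num_list out) := by unfold Spec_sum_of_digits_in_list; infer_instance

-- ===== CLAIM (what is proved, stated in full; the proofs are below) =====
def Claim_equal_sum_of_digits_in_list : Prop := ∀ (num_list : List Int), Dom_sum_of_digits_in_list num_list → Spec_sum_of_digits_in_list num_list (sum_of_digits_in_list num_list)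

-- ===== LEMMAS AND PROOFS =====


-- digit sum of a natural number, by repeated divmod
def pvDsum : Nat → Nat
  | 0 => 0
  | n + 1 => ((n + 1) % 10) + pvDsum ((n + 1) / 10)
decreasing_by exact Nat.div_lt_self (Nat.succ_pos n) (by norm_num)

theorem pvDsum_eq (n : Nat) (h : 0 < n) : pvDsum n = n % 10 + pvDsum (n / 10) := by
  cases n with
  | zero => omega
  | succ m => rw [pvDsum]

theorem pvCharVal_digitChar (d : Nat) (h : d < 10) :
    pvCharVal (Nat.digitChar d) = (d : Int) := by
  interval_cases d <;> decide

theorem pvToDigitsCore_sum (fuel : Nat) :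
    ∀ (n : Nat) (acc : List Char), 0 < fuel → n < 10 ^ fuel →
    ((Nat.toDigitsCore 10 fuel n acc).map pvCharVal).sum
      = (pvDsum n : Int) + ((acc.map pvCharVal).sum) := by
  induction fuel with
  | zero => intro n acc h; omega
  | succ f ih =>
    intro n acc _ hn
    rw [Nat.toDigitsCore]
    by_cases hz : n / 10 = 0
    · rw [if_pos hz]
      simp only [List.map_cons, List.sum_cons]
      rw [pvCharVal_digitChar _ (Nat.mod_lt _ (by norm_num))]
      rcases Nat.eq_zero_or_pos n with h0 | h0
      · subst h0; simp [pvDsum]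
      · rw [pvDsum_eq n h0, hz]
        simp [pvDsum]
    · rw [if_neg hz]
      have hn10 : 10 ≤ n := by omega
      have hf : 0 < f := by
        rcases Nat.eq_zero_or_pos f with rfl | h; · norm_num at hn; omega
        · exact h
      have hlt : n / 10 < 10 ^ f :=
        Nat.div_lt_of_lt_mul (by rw [mul_comm, ← pow_succ]; exact hn)
      rw [ih (n / 10) _ hf hlt]
      simp only [List.map_cons, List.sum_cons]
      rw [pvCharVal_digitChar _ (Nat.mod_lt _ (by norm_num))]
      rw [pvDsum_eq n (by omega)]
      push_cast
      ring

theorem pvDigitLoop_eq (n : Nat) : ∀ (s : Int), 0 < n → pvDigitLoop (n : Int) s = s + (pvDsum n : Int) := by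
  induction n using Nat.strong_induction_on with
  | _ n ih =>
    intro s hn
    rw [pvDigitLoop]
    have hpos : (n : Int) > 0 := by exact_mod_cast hn
    rw [dif_pos hpos]
    have hfd : PySem.Int.floordiv (n : Int) 10 = ((n / 10 : Nat) : Int) := by
      simp only [PySem.Int.floordiv, Int.fdiv_eq_ediv]
      omega
    have hmd : PySem.Int.mod (n : Int) 10 = ((n % 10 : Nat) : Int) := by
      simp only [PySem.Int.mod, Int.fmod_eq_emod]
      omega
    rw [hfd, hmd]
    rcases Nat.eq_zero_or_pos (n / 10) with h0 | h0
    · rw [h0]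
      rw [pvDigitLoop, dif_neg (by norm_num)]
      rw [pvDsum_eq n hn, h0]
      simp [pvDsum]
    · rw [ih (n / 10) (Nat.div_lt_self hn (by norm_num)) _ h0]
      rw [pvDsum_eq n hn]
      push_cast
      ring

theorem pvInner_eq (num : Int) :
    pvDigitLoop num 0 = (if num > 0 then ((PySem.Int.toChars num).map pvCharVal).sum else 0) := by
  by_cases h : num > 0
  · rw [if_pos h]
    have hn : num = (num.toNat : Int) := by omega
    have hpos : 0 < num.toNat := by omega
    rw [hn, pvDigitLoop_eq num.toNat 0 hpos]
    have htc : PySem.Int.toChars ((num.toNat : Int)) = Nat.toDigits 10 num.toNat := by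
      rw [PySem.Int.toChars, if_neg (by omega)]
      congr 1
    rw [htc, Nat.toDigits]
    have hpow : num.toNat < 10 ^ (num.toNat + 1) :=
      lt_of_lt_of_le (Nat.lt_pow_self (by norm_num))
        (Nat.pow_le_pow_right (by norm_num) (Nat.le_succ _))
    rw [pvToDigitsCore_sum (num.toNat + 1) num.toNat [] (by omega) hpow]
    simp
  · rw [if_neg h]
    rw [pvDigitLoop, dif_neg h]

theorem pvFoldl_eq (l : List Int) : ∀ (acc : List Int),
    l.foldl (fun sum_digits_list num => sum_digits_list ++ [pvDigitLoop num 0]) acc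
      = acc ++ l.map (fun num => if num > 0 then ((PySem.Int.toChars num).map pvCharVal).sum else 0) := by
  induction l with
  | nil => intro acc; simp
  | cons x xs ih =>
    intro acc
    simp only [List.foldl_cons, List.map_cons]
    rw [ih, pvInner_eq]
    simp

-- ===== VERDICT (by name: the statement is the Claim_ definition above) =====
theorem sum_of_digits_in_list_spec : Claim_equal_sum_of_digits_in_list := by
  intro num_list _
  show sum_of_digits_in_list num_list = sum_of_digits_in_list_alt num_list
  rw [sum_of_digits_in_list, sum_of_digits_in_list_alt, pvFoldl_eq]
  simp
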